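-- pv_equiv track=rewrite | github.com/gabrielegabellone/lotto_game | lotto/printer.py | bill_representation
-- ===== SOURCE A (Python) =====
-- def bill_representation(bet_type: str, numbers: list, city: str) -> str:
--     """Creates the representation of the bill.
--
--     :return: a bill represented as an ascii art table
--     """
--     dashed_line = "+{:-^30}+\n".format("")
--     title_line = "|{:^30}|\n".format("Lotto Ticket")
--     city_line = "|{:14}{:^16}|\n".format("  CITY       |", city)
--     bet_line = "|{:14}{:^16}|\n".format("  BET TYPE   |", bet_type)
--
--     max_numbers_per_bill = 10
--     max_num_per_row = 5
--     numbers_line = "|"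
--     for n in range(max_numbers_per_bill):
--         if n == max_num_per_row:
--             numbers_line += "|\n|"
--         if n < len(numbers):
--             numbers_line += "{:^6}".format(numbers[n])
--         else:
--             numbers_line += "      "
--     numbers_line += "|\n"
--
--     representation = f"{dashed_line}{title_line}{dashed_line}{city_line}{bet_line}{dashed_line}{numbers_line}{dashed_line}"
--     return representation
-- ===== SOURCE B (Python) =====
-- def bill_representation(bet_type: str, numbers: list, city: str) -> str:
--     """Creates the representation of the bill.
--
--     Declarative version: the bill is a list of complete lines joined at the end;
--     the ten number cells come from a None-padded copy of the numbers, rendered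
--     recursively row by row.
--     """
--     padded = list(numbers[:10]) + [None] * (10 - min(len(numbers), 10))
--
--     def row(vals):
--         if not vals:
--             return ""
--         head = "      " if vals[0] is None else "{:^6}".format(vals[0])
--         return head + row(vals[1:])
--
--     dashed = "+" + "-" * 30 + "+"
--     lines = [
--         dashed,
--         "|{:^30}|".format("Lotto Ticket"),
--         dashed,
--         "|  CITY       |{:^16}|".format(city),
--         "|  BET TYPE   |{:^16}|".format(bet_type),
--         dashed,
--         "|" + row(padded[:5]) + "|",
--         "|" + row(padded[5:]) + "|",
--         dashed,
--     ]
--     return "\n".join(lines) + "\n"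
-- ===== Notes on version B (the rewrite author's own statement) =====
-- stated objective: alternative
-- what changed: A builds the numbers block in one accumulator loop over range(10) with a mid-loop '|\n|' sentinel and concatenates ready-made newline-terminated blocks; B first pads the numbers to ten values with None, renders each five-value row by a recursive helper, lays the whole bill out as a list of complete lines and joins them with '\n' at the end.
import Mathlib
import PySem

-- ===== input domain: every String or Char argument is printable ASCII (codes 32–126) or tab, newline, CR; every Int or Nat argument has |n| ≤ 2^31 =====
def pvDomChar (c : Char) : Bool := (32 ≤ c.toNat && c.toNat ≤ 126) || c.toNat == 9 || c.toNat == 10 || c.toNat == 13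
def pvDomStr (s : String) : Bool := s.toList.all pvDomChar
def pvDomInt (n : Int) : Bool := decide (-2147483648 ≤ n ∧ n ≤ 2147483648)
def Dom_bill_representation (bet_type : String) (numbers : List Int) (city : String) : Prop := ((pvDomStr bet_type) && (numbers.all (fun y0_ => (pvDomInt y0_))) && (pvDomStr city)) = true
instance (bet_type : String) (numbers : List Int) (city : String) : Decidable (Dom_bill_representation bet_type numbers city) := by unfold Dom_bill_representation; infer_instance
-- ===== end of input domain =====

-- B replaces A's single accumulator loop (with its mid-loop '|\n|' sentinel) by a declarative
-- decomposition: a None-padded value list, a recursive row renderer, and a list of complete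
-- lines joined at the end; objective: alternative, same cost.

-- Python's '{:^w}' with a fill char and '{:w}' left-justify, exact for any argument length
def pyCenter (fill : Char) (w : Nat) (cs : List Char) : List Char :=
  let pad := w - cs.length
  List.replicate (pad / 2) fill ++ cs ++ List.replicate (pad - pad / 2) fill

def pyLjust (w : Nat) (cs : List Char) : List Char :=
  cs ++ List.replicate (w - cs.length) ' '

-- ===== PORT A =====
def bill_representation (bet_type : String) (numbers : List Int) (city : String) : String :=
  let dashed_line : List Char := '+' :: pyCenter '-' 30 [] ++ ['+', '\n']
  let title_line : List Char := '|' :: pyCenter ' ' 30 "Lotto Ticket".toList ++ ['|', '\n']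
  let city_line : List Char :=
    '|' :: pyLjust 14 "  CITY       |".toList ++ pyCenter ' ' 16 city.toList ++ ['|', '\n']
  let bet_line : List Char :=
    '|' :: pyLjust 14 "  BET TYPE   |".toList ++ pyCenter ' ' 16 bet_type.toList ++ ['|', '\n']
  -- the loop: for n in range(10), with the row-break sentinel at n == 5
  let numbers_line : List Char :=
    (PySem.List.pyRange 0 10 1).foldl
      (fun acc n =>
        let acc := if n == 5 then acc ++ ['|', '\n', '|'] else acc
        if n < (numbers.length : Int) then
          acc ++ pyCenter ' ' 6 (PySem.Int.toChars (PySem.List.pyGetD numbers n 0))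
        else
          acc ++ List.replicate 6 ' ')
      ['|']
  let numbers_line := numbers_line ++ ['|', '\n']
  String.ofList (dashed_line ++ title_line ++ dashed_line ++ city_line ++ bet_line ++ dashed_line ++
    numbers_line ++ dashed_line)

-- ===== PORT B =====
-- one cell: six spaces for the None padding, centred str(n) for a number
def pvCell (v : Option Int) : List Char :=
  match v with
  | none => List.replicate 6 ' '
  | some x => pyCenter ' ' 6 (PySem.Int.toChars x)

-- recursive row renderer (Source B's 'row')
def pvRowRender : List (Option Int) → List Char
  | [] => []
  | v :: rest => pvCell v ++ pvRowRender rest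

def bill_representation_alt (bet_type : String) (numbers : List Int) (city : String) : String :=
  let padded : List (Option Int) :=
    (numbers.take 10).map some ++ List.replicate (10 - min numbers.length 10) none
  let dashed : List Char := '+' :: List.replicate 30 '-' ++ ['+']
  let lines : List (List Char) :=
    [ dashed,
      '|' :: pyCenter ' ' 30 "Lotto Ticket".toList ++ ['|'],
      dashed,
      "|  CITY       |".toList ++ pyCenter ' ' 16 city.toList ++ ['|'],
      "|  BET TYPE   |".toList ++ pyCenter ' ' 16 bet_type.toList ++ ['|'],
      dashed,
      '|' :: pvRowRender (padded.take 5) ++ ['|'],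
      '|' :: pvRowRender (padded.drop 5) ++ ['|'],
      dashed ]
  String.ofList (List.intercalate ['\n'] lines ++ ['\n'])

-- ===== PRECONDITION & SPEC =====
def Spec_bill_representation (bet_type : String) (numbers : List Int) (city : String) (out : String) : Prop := out = bill_representation_alt bet_type numbers city
instance (bet_type : String) (numbers : List Int) (city : String) (out : String) : Decidable (Spec_bill_representation bet_type numbers city out) := by unfold Spec_bill_representation; infer_instance

-- ===== CLAIM (what is proved, stated in full; the proofs are below) =====
def Claim_equal_bill_representation : Prop := ∀ (bet_type : String) (numbers : List Int) (city : String), Dom_bill_representation bet_type numbers city → Spec_bill_representation bet_type numbers city (bill_representation bet_type numbers city)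

-- ===== LEMMAS AND PROOFS =====

-- pull the accumulator out of a conditional append (A's loop body shape)
theorem ite_append_acc {α : Type} (c : Prop) [Decidable c] (acc x y : List α) :
    (if c then acc ++ x else acc ++ y) = acc ++ (if c then x else y) := by
  split_ifs <;> rfl

theorem pyRange_0_10 : PySem.List.pyRange 0 10 1 = [0, 1, 2, 3, 4, 5, 6, 7, 8, 9] := by decide

-- the padded value list, cell by cell
theorem pad_eq (l : List Int) :
    (l.take 10).map some ++ List.replicate (10 - min l.length 10) (none : Option Int)
      = (List.range 10).map (fun i => if i < l.length then some (l.getD i 0) else none) := by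
  apply List.ext_getElem
  · simp; omega
  · intro i h1 h2
    simp only [List.length_append, List.length_map, List.length_take, List.length_replicate] at h1
    rcases lt_or_ge i (min l.length 10) with h | h
    · rw [List.getElem_append_left (by simp; omega)]
      simp only [List.getElem_map, List.getElem_take, List.getElem_range]
      rw [if_pos (by omega), List.getD_eq_getElem l 0 (by omega)]
    · rw [List.getElem_append_right (by simp; omega)]
      simp only [List.getElem_replicate, List.getElem_map, List.getElem_range]
      rw [if_neg (by omega)]

theorem take5_of10 {α : Type} (a b c d e f g h i j : α) :
    List.take 5 [a, b, c, d, e, f, g, h, i, j] = [a, b, c, d, e] := rfl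

theorem drop5_of10 {α : Type} (a b c d e f g h i j : α) :
    List.drop 5 [a, b, c, d, e, f, g, h, i, j] = [f, g, h, i, j] := rfl

theorem pvCell_none : pvCell none = List.replicate 6 ' ' := rfl

theorem pvCell_some (x : Int) : pvCell (some x) = pyCenter ' ' 6 (PySem.Int.toChars x) := rfl

theorem range_10 : List.range 10 = [0, 1, 2, 3, 4, 5, 6, 7, 8, 9] := by decide

-- ===== VERDICT (by name: the statement is the Claim_ definition above) =====
theorem bill_representation_spec : Claim_equal_bill_representation := by
  intro bet_type numbers city _
  show bill_representation bet_type numbers city = bill_representation_alt bet_type numbers city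
  unfold bill_representation bill_representation_alt
  simp only [show pyCenter '-' 30 ([] : List Char) = List.replicate 30 '-' from by decide,
    show pyLjust 14 "  CITY       |".toList = "  CITY       |".toList from by decide,
    show pyLjust 14 "  BET TYPE   |".toList = "  BET TYPE   |".toList from by decide,
    show ("|  CITY       |".toList : List Char) = '|' :: "  CITY       |".toList from by decide,
    show ("|  BET TYPE   |".toList : List Char) = '|' :: "  BET TYPE   |".toList from by decide]
  simp only [pad_eq, range_10, pyRange_0_10, List.map_cons, List.map_nil,
    take5_of10, drop5_of10, List.foldl_cons, List.foldl_nil, pvRowRender, ite_append_acc, beq_iff_eq,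
    Int.reduceEq, if_false, if_true, apply_ite pvCell, pvCell_none, pvCell_some, List.intercalate,
    List.intersperse, List.flatten, List.append_eq, PySem.List.pyGetD_ofNat',
    Nat.ofNat_lt_cast, Nat.cast_pos, Nat.one_lt_cast,
    pyCenter, List.append_assoc, List.cons_append, List.nil_append]
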